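-- pv_equiv track=rewrite | github.com/manuelrubio/recursion | chapter01/listing_01_06.py | sum_list_limits_3
-- ===== SOURCE A (Python) =====
-- def sum_list_limits_3(a, lower, upper):
--     if lower > upper:
--         return 0
--     elif lower == upper:
--         return a[lower]  # or a[upper]
--     else:
--         middle = (upper + lower) // 2
--         return (sum_list_limits_3(a, lower, middle)
--                 + sum_list_limits_3(a, middle + 1, upper))
-- ===== SOURCE B (Python) =====
-- def sum_list_limits_3(a, lower, upper):
--     total = 0
--     for i in range(lower, upper + 1):
--         total += a[i]
--     return total
-- ===== Notes on version B (the rewrite author's own statement) =====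
-- stated objective: simpler
-- what changed: Replaces the binary divide-and-conquer recursion with a single iterative pass accumulating a[i] for i in range(lower, upper+1).
import Mathlib
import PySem

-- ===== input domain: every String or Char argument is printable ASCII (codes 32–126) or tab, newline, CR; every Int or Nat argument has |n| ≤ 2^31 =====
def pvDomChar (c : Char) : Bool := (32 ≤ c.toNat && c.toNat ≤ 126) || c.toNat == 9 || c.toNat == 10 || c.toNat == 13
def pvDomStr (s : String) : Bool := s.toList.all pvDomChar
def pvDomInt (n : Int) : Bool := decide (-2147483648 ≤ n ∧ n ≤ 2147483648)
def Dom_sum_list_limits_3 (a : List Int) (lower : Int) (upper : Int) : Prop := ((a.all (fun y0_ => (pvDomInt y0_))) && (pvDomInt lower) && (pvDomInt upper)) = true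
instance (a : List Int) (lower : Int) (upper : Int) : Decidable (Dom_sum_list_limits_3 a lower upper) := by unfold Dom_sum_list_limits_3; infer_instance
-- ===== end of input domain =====

-- B replaces the binary divide-and-conquer recursion with a single iterative accumulation over range(lower, upper+1).

-- ===== PORT A =====
-- fuel = (upper-lower).toNat+1 is a totality guard only; it is never exhausted (see sumA_fuel_eq).
def sumA (fuel : Nat) (a : List Int) (lower : Int) (upper : Int) : Int :=
  match fuel with
  | 0 => 0
  | f + 1 =>
    if lower > upper then 0
    else if lower = upper then PySem.List.pyGetD a lower 0
    else
      let middle := PySem.Int.floordiv (upper + lower) 2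
      sumA f a lower middle + sumA f a (middle + 1) upper

def sum_list_limits_3 (a : List Int) (lower : Int) (upper : Int) : Int :=
  sumA ((upper - lower).toNat + 1) a lower upper

-- ===== PORT B =====
def sum_list_limits_3_alt (a : List Int) (lower : Int) (upper : Int) : Int :=
  (PySem.List.pyRange lower (upper + 1) 1).foldl (fun total i => total + PySem.List.pyGetD a i 0) 0

-- ===== PRECONDITION & SPEC =====
-- Pre_ excludes exactly the inputs where Python raises IndexError: lower ≤ upper with some
-- accessed index out of Python range (both programs access every index in [lower, upper]).
def Pre_sum_list_limits_3 (a : List Int) (lower : Int) (upper : Int) : Prop :=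
  lower > upper ∨ (-(a.length : Int) ≤ lower ∧ upper < (a.length : Int))
instance (a : List Int) (lower : Int) (upper : Int) : Decidable (Pre_sum_list_limits_3 a lower upper) := by unfold Pre_sum_list_limits_3; infer_instance

def pvWitness_sum_list_limits_3 : List Int × Int × Int := ([3, -1, 4, 1, 5], 1, 3)

def Spec_sum_list_limits_3 (a : List Int) (lower : Int) (upper : Int) (out : Int) : Prop := out = sum_list_limits_3_alt a lower upper
instance (a : List Int) (lower : Int) (upper : Int) (out : Int) : Decidable (Spec_sum_list_limits_3 a lower upper out) := by unfold Spec_sum_list_limits_3; infer_instance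

-- ===== CLAIM (what is proved, stated in full; the proofs are below) =====
def Claim_equal_sum_list_limits_3 : Prop := ∀ (a : List Int) (lower : Int) (upper : Int), Dom_sum_list_limits_3 a lower upper → Pre_sum_list_limits_3 a lower upper → Spec_sum_list_limits_3 a lower upper (sum_list_limits_3 a lower upper)

-- ===== LEMMAS AND PROOFS =====

-- folding addition over a list equals the initial value plus the sum of the mapped values
theorem foldl_add_eq_sum (g : Int → Int) (l : List Int) (t : Int) :
    l.foldl (fun total i => total + g i) t = t + (l.map g).sum := by
  induction l generalizing t with
  | nil => simp
  | cons x xs ih => simp [List.foldl, ih (t + g x)]; ring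

-- the divide-and-conquer recursion computes the interval sum, for any sufficient fuel
theorem sumA_fuel_eq (a : List Int) :
    ∀ (fuel : Nat) (lower upper : Int), (upper - lower).toNat < fuel →
    sumA fuel a lower upper = ((PySem.List.pyRange lower (upper + 1) 1).map (fun i => PySem.List.pyGetD a i 0)).sum := by
  intro fuel
  induction fuel with
  | zero => intro lower upper h; omega
  | succ f ih =>
    intro lower upper h
    by_cases h1 : lower > upper
    · rw [PySem.List.pyRange_one_eq_nil (by omega)]
      simp [sumA, h1]
    · by_cases h2 : lower = upper
      · subst h2
        rw [PySem.List.pyRange_one_singleton]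
        simp [sumA]
      · have hlt : lower < upper := by omega
        have hm : lower ≤ PySem.Int.floordiv (upper + lower) 2 ∧
            PySem.Int.floordiv (upper + lower) 2 < upper := by
          rw [PySem.Int.floordiv_eq_ediv_of_pos (by omega)]
          omega
        set m := PySem.Int.floordiv (upper + lower) 2 with hmdef
        have e1 : sumA (f + 1) a lower upper = sumA f a lower m + sumA f a (m + 1) upper := by
          simp only [sumA]
          rw [if_neg (by omega), if_neg h2]
        rw [e1, ih lower m (by omega), ih (m + 1) upper (by omega),
          PySem.List.pyRange_one_append lower (m + 1) (upper + 1) (by omega) (by omega),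
          List.map_append, List.sum_append]

-- ===== VERDICT (by name: the statement is the Claim_ definition above) =====
theorem sum_list_limits_3_spec : Claim_equal_sum_list_limits_3 := by
  intro a lower upper _ _
  unfold Spec_sum_list_limits_3 sum_list_limits_3 sum_list_limits_3_alt
  rw [sumA_fuel_eq a _ lower upper (by omega), foldl_add_eq_sum]
  simp
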